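-- pv_equiv track=rewrite | github.com/Michaelx618/moonlet | ai_shell/search_replace.py | _parse_python_string
-- ===== SOURCE A (Python) =====
-- from typing import Any, Dict, List, Optional, Tuple
--
-- def _parse_python_string(
--     text: str, start: int, quote_char: str = '"'
-- ) -> Tuple[Optional[str], int]:
--     """Parse a Python string from text starting at start. Returns (value, end_pos) or (None, start)."""
--     if start >= len(text) or text[start] != quote_char:
--         return None, start
--     pos = start + 1
--     triple = text[start : start + 3] == quote_char * 3
--     if triple:
--         pos = start + 3
--     result: List[str] = []
--     while pos < len(text):
--         ch = text[pos]
--         if triple: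
--             if text[pos : pos + 3] == quote_char * 3:
--                 return "".join(result), pos + 3
--             if ch == "\\" and pos + 1 < len(text):
--                 next_ch = text[pos + 1]
--                 if next_ch == "n":
--                     result.append("\n")
--                     pos += 2
--                     continue
--                 if next_ch == "t":
--                     result.append("\t")
--                     pos += 2
--                     continue
--                 if next_ch == "r":
--                     result.append("\r")
--                     pos += 2
--                     continue
--                 if next_ch == quote_char:
--                     result.append(quote_char)
--                     pos += 2
--                     continue
--                 if next_ch == "\\":
--                     result.append("\\")
--                     pos += 2
--                     continue
--             result.append(ch)
--             pos += 1
--         else: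
--             if ch == quote_char:
--                 return "".join(result), pos + 1
--             if ch == "\\" and pos + 1 < len(text):
--                 next_ch = text[pos + 1]
--                 if next_ch == "n":
--                     result.append("\n")
--                     pos += 2
--                     continue
--                 if next_ch == "t":
--                     result.append("\t")
--                     pos += 2
--                     continue
--                 if next_ch == "r":
--                     result.append("\r")
--                     pos += 2
--                     continue
--                 if next_ch == quote_char:
--                     result.append(quote_char)
--                     pos += 2
--                     continue
--                 if next_ch == "\\":
--                     result.append("\\")
--                     pos += 2
--                     continue
--             result.append(ch)
--             pos += 1
--     return None, start
-- ===== SOURCE B (Python) =====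
-- from typing import List, Optional, Tuple
--
--
-- def _escape_char(next_ch: str, quote_char: str) -> Optional[str]:
--     if next_ch == "n":
--         return "\n"
--     if next_ch == "t":
--         return "\t"
--     if next_ch == "r":
--         return "\r"
--     if next_ch == quote_char or next_ch == "\\":
--         return next_ch
--     return None
--
--
-- def _parse_python_string(
--     text: str, start: int, quote_char: str = '"'
-- ) -> Tuple[Optional[str], int]:
--     """Parse a Python string from text starting at start. Returns (value, end_pos) or (None, start)."""
--     n = len(text)
--     if start < 0 or start >= n or text[start] != quote_char:
--         return None, start
--     if text[start : start + 3] == quote_char * 3: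
--         pos, term = start + 3, quote_char * 3
--     else:
--         pos, term = start + 1, quote_char
--     parts: List[str] = []
--     while pos < n:
--         bs = text.find("\\", pos)
--         tq = text.find(term, pos)
--         if tq != -1 and (bs == -1 or tq <= bs):
--             parts.append(text[pos:tq])
--             return "".join(parts), tq + len(term)
--         if bs == -1:
--             break
--         parts.append(text[pos:bs])
--         pos = bs
--         rep = _escape_char(text[pos + 1], quote_char) if pos + 1 < n else None
--         if rep is not None:
--             parts.append(rep)
--             pos += 2
--         else:
--             parts.append("\\")
--             pos += 1
--     return None, start
-- ===== Notes on version B (the rewrite author's own statement) =====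
-- stated objective: alternative
-- what changed: B replaces A's character-by-character while loop with a chunked scan that uses str.find to jump to the next backslash or terminator and copies the escape-free text between specials as whole slices; Pre_ restricts to non-negative start positions, the parser's natural domain.
-- outside the precondition, e.g. on _parse_python_string('aa', -2, 'a'): A returns ('', 0), B returns (None, -2); on _parse_python_string('ab', -1, 'b'): A returns ('a', 2), B returns (None, -1); on _parse_python_string('a', -2, 'a'): A raises IndexError, B returns (None, -2)
import Mathlib
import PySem

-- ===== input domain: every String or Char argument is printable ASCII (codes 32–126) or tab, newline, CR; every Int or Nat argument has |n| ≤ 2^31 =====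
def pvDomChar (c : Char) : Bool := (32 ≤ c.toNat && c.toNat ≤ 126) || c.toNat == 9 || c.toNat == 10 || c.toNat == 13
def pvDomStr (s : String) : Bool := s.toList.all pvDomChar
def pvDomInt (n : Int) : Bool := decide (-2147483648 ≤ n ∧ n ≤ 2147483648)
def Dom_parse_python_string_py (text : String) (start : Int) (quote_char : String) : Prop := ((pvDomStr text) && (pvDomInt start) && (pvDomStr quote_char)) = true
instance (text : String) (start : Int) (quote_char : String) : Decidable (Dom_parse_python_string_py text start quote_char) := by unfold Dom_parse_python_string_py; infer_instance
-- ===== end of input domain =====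

-- B re-implements the scan with str.find jumps to the next backslash/terminator, copying
-- escape-free stretches as whole slices, instead of A's character-by-character while loop
-- (objective: alternative); equal value proved on Pre_ (non-negative parse positions).

-- ===== PORT A =====
-- A's while loop: one fuel tick per iteration; pos is an Int (it can be negative when start < 0),
-- so indexing/slicing go through PySem.List.pyGet?/slice (Python negative-index semantics).
def pvALoop (cs q : List Char) (triple : Bool) (res : List (List Char)) (pos : Int) : Nat → Option (List (List Char) × Int)
  | 0 => none            -- fuel exhausted: unreachable, fuel ≥ iterations
  | fuel+1 =>
    if pos < (cs.length : Int) then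
      match PySem.List.pyGet? cs pos with
      | none => none     -- unreachable: -cs.length ≤ start < pos < cs.length
      | some ch =>
        if triple then
          if PySem.List.slice cs (some pos) (some (pos+3)) = q ++ q ++ q then
            some (res, pos + 3)
          else if ch = '\\' ∧ pos + 1 < (cs.length : Int) then
            match PySem.List.pyGet? cs (pos+1) with
            | none => none   -- unreachable (pos+1 < cs.length and pos+1 > -cs.length)
            | some nx =>
              if nx = 'n' then pvALoop cs q triple (res ++ [['\n']]) (pos+2) fuel
              else if nx = 't' then pvALoop cs q triple (res ++ [['\t']]) (pos+2) fuel
              else if nx = 'r' then pvALoop cs q triple (res ++ [['\r']]) (pos+2) fuel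
              else if [nx] = q then pvALoop cs q triple (res ++ [q]) (pos+2) fuel
              else if nx = '\\' then pvALoop cs q triple (res ++ [['\\']]) (pos+2) fuel
              else pvALoop cs q triple (res ++ [[ch]]) (pos+1) fuel
          else pvALoop cs q triple (res ++ [[ch]]) (pos+1) fuel
        else
          if [ch] = q then some (res, pos + 1)
          else if ch = '\\' ∧ pos + 1 < (cs.length : Int) then
            match PySem.List.pyGet? cs (pos+1) with
            | none => none   -- unreachable
            | some nx =>
              if nx = 'n' then pvALoop cs q triple (res ++ [['\n']]) (pos+2) fuel
              else if nx = 't' then pvALoop cs q triple (res ++ [['\t']]) (pos+2) fuel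
              else if nx = 'r' then pvALoop cs q triple (res ++ [['\r']]) (pos+2) fuel
              else if [nx] = q then pvALoop cs q triple (res ++ [q]) (pos+2) fuel
              else if nx = '\\' then pvALoop cs q triple (res ++ [['\\']]) (pos+2) fuel
              else pvALoop cs q triple (res ++ [[ch]]) (pos+1) fuel
          else pvALoop cs q triple (res ++ [[ch]]) (pos+1) fuel
    else none              -- loop exits: unterminated → (None, start)

def parse_python_string_py (text : String) (start : Int) (quote_char : String) : Option String × Int :=
  let cs := text.toList
  let q := quote_char.toList
  if start ≥ (cs.length : Int) then (none, start)
  else match PySem.List.pyGet? cs start with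
  | none => (none, start)  -- Python raises IndexError here (start < -len(text)); excluded by Pre_
  | some c =>
    if [c] ≠ q then (none, start)
    else
      let triple : Bool := PySem.List.slice cs (some start) (some (start+3)) = q ++ q ++ q
      let pos : Int := if triple then start + 3 else start + 1
      match pvALoop cs q triple [] pos (2 * cs.length + 3) with
      | some (res, e) => (some (String.ofList res.flatten), e)
      | none => (none, start)

-- ===== PORT B =====
def pvEscapeChar? (nx : Char) (q : List Char) : Option (List Char) :=
  if nx = 'n' then some ['\n']
  else if nx = 't' then some ['\t']
  else if nx = 'r' then some ['\r']
  else if [nx] = q ∨ nx = '\\' then some [nx]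
  else none

-- Source B's while loop: one fuel tick per iteration; pos is a Nat (B rejects negative start up front).
def pvBLoop (cs term q : List Char) (parts : List (List Char)) (pos : Nat) : Nat → Option (List (List Char) × Int)
  | 0 => none            -- fuel exhausted: unreachable
  | fuel+1 =>
    if pos < cs.length then
      let bs := PySem.Chars.findFrom cs ['\\'] (pos : Int)
      let tq := PySem.Chars.findFrom cs term (pos : Int)
      if tq ≠ -1 ∧ (bs = -1 ∨ tq ≤ bs) then
        some (parts ++ [PySem.List.slice cs (some (pos : Int)) (some tq)], tq + (term.length : Int))
      else if bs = -1 then none   -- break: unterminated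
      else
        let b := bs.toNat
        let parts1 := parts ++ [PySem.List.slice cs (some (pos : Int)) (some bs)]
        let rep? := if b + 1 < cs.length then
            match cs[b+1]? with
            | some nx => pvEscapeChar? nx q
            | none => none         -- unreachable: b+1 < cs.length
          else none
        match rep? with
        | some rep => pvBLoop cs term q (parts1 ++ [rep]) (b+2) fuel
        | none => pvBLoop cs term q (parts1 ++ [['\\']]) (b+1) fuel
    else none

def parse_python_string_py_alt (text : String) (start : Int) (quote_char : String) : Option String × Int :=
  let cs := text.toList
  let q := quote_char.toList
  if start < 0 ∨ start ≥ (cs.length : Int) then (none, start)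
  else
    let s := start.toNat
    match cs[s]? with
    | none => (none, start)  -- unreachable: 0 ≤ start < cs.length
    | some c =>
      if [c] ≠ q then (none, start)
      else
        let trip : Bool := (cs.drop s).take 3 = q ++ q ++ q
        let pos := if trip then s + 3 else s + 1
        let term := if trip then q ++ q ++ q else q
        match pvBLoop cs term q [] pos (cs.length + 1) with
        | some (parts, e) => (some (String.ofList parts.flatten), e)
        | none => (none, start)

-- ===== PRECONDITION & SPEC =====
-- Pre_ excludes negative start: a parse position is a non-negative index; for start < -len(text)
-- A raises IndexError at text[start], and for -len(text) <= start < 0 A accidentally reads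
-- text[start] (and then scans) through Python's negative-index wraparound, which no caller of a
-- position-based parser would specify; B returns (None, start) there.
def Pre_parse_python_string_py (text : String) (start : Int) (quote_char : String) : Prop :=
  0 ≤ start
instance (text : String) (start : Int) (quote_char : String) : Decidable (Pre_parse_python_string_py text start quote_char) := by unfold Pre_parse_python_string_py; infer_instance

def pvWitness_parse_python_string_py : String × Int × String := ("\"ab\\n\"", 0, "\"")

def Spec_parse_python_string_py (text : String) (start : Int) (quote_char : String) (out : Option String × Int) : Prop := out = parse_python_string_py_alt text start quote_char
instance (text : String) (start : Int) (quote_char : String) (out : Option String × Int) : Decidable (Spec_parse_python_string_py text start quote_char out) := by unfold Spec_parse_python_string_py; infer_instance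

-- ===== CLAIM (what is proved, stated in full; the proofs are below) =====
def Claim_equal_parse_python_string_py : Prop := ∀ (text : String) (start : Int) (quote_char : String), Dom_parse_python_string_py text start quote_char → Pre_parse_python_string_py text start quote_char → Spec_parse_python_string_py text start quote_char (parse_python_string_py text start quote_char)

-- ===== LEMMAS AND PROOFS =====

def pvMapFlat (o : Option (List (List Char) × Int)) : Option (List Char × Int) :=
  o.map (fun p => (p.1.flatten, p.2))

lemma pv_findFrom_eq_of_prefix (cs sub : List Char) (pos : Nat) (hpos : pos ≤ cs.length)
    (h : sub <+: cs.drop pos) : PySem.Chars.findFrom cs sub (pos : Int) = (pos : Int) := by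
  have hne : PySem.Chars.findFrom cs sub (pos : Int) ≠ -1 := by
    rw [Ne, PySem.Chars.findFrom_natCast_eq_neg_one_iff cs sub pos hpos]
    exact not_not_intro h.isInfix
  obtain ⟨hge, hpre, hmin⟩ := PySem.Chars.findFrom_natCast_spec cs sub pos hpos hne
  set f := PySem.Chars.findFrom cs sub (pos : Int) with hf
  have h0 : (0:Int) ≤ f := le_trans (by positivity) hge
  have hcast : f = (f.toNat : Int) := (Int.toNat_of_nonneg h0).symm
  have hple : pos ≤ f.toNat := by omega
  rcases Nat.lt_or_ge pos f.toNat with hlt | hge2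
  · exact absurd h (hmin pos le_rfl hlt)
  · omega

lemma pv_findFrom_gt_of_not_prefix (cs sub : List Char) (pos : Nat) (hpos : pos ≤ cs.length)
    (h : ¬ sub <+: cs.drop pos) :
    PySem.Chars.findFrom cs sub (pos : Int) = -1 ∨ (pos : Int) < PySem.Chars.findFrom cs sub (pos : Int) := by
  by_cases hne : PySem.Chars.findFrom cs sub (pos : Int) = -1
  · exact Or.inl hne
  · obtain ⟨hge, hpre, hmin⟩ := PySem.Chars.findFrom_natCast_spec cs sub pos hpos hne
    set f := PySem.Chars.findFrom cs sub (pos : Int) with hf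
    have h0 : (0:Int) ≤ f := le_trans (by positivity) hge
    have hcast : f = (f.toNat : Int) := (Int.toNat_of_nonneg h0).symm
    have : pos ≠ f.toNat := by
      intro he; rw [← he] at hpre; exact h hpre
    right; omega

lemma pv_find_cons (c : Char) (l sub : List Char) (h : ¬ sub <+: c :: l) :
    PySem.Chars.find (c :: l) sub =
      if PySem.Chars.find l sub = -1 then -1 else PySem.Chars.find l sub + 1 := by
  by_cases h1 : PySem.Chars.find l sub = -1
  · rw [if_pos h1]
    rw [PySem.Chars.find_eq_neg_one_iff] at h1 ⊢
    rw [List.infix_cons_iff]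
    rintro (hp | hi)
    · exact h hp
    · exact h1 hi
  · rw [if_neg h1]
    have h0 : (0:Int) ≤ PySem.Chars.find l sub :=
      lt_of_le_of_ne (PySem.Chars.neg_one_le_find l sub) (Ne.symm h1) |>.le |> fun _ => by
        have := PySem.Chars.neg_one_le_find l sub; omega
    obtain ⟨hpre, hmin⟩ := PySem.Chars.find_spec h0
    set j := (PySem.Chars.find l sub).toNat with hj
    have hinf : sub <:+: c :: l :=
      List.infix_cons (hpre.isInfix.trans (List.drop_suffix j l).isInfix)
    have h0' : (0:Int) ≤ PySem.Chars.find (c :: l) sub := (PySem.Chars.find_nonneg_iff _ _).mpr hinf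
    obtain ⟨hpre', hmin'⟩ := PySem.Chars.find_spec h0'
    set t := (PySem.Chars.find (c :: l) sub).toNat with ht
    have ht0 : t ≠ 0 := by
      intro he; rw [he] at hpre'; simp at hpre'; exact h hpre'
    have htj : t ≤ j + 1 := by
      by_contra hgt
      exact hmin' (j+1) (by omega) (by simpa using hpre)
    have hjt : j ≤ t - 1 := by
      by_contra hgt
      have hdt : (c :: l).drop t = l.drop (t-1) := by
        obtain ⟨t', he⟩ := Nat.exists_eq_succ_of_ne_zero ht0
        rw [he]; simp
      have : sub <+: l.drop (t-1) := by rwa [hdt] at hpre'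
      exact hmin (t-1) (by omega) this
    have : t = j + 1 := by omega
    have hcast : (PySem.Chars.find (c::l) sub) = (t : Int) := (Int.toNat_of_nonneg h0').symm
    have hcast2 : (PySem.Chars.find l sub) = (j : Int) := (Int.toNat_of_nonneg h0).symm
    omega

lemma pv_findFrom_succ (cs sub : List Char) (pos : Nat) (hpos : pos < cs.length)
    (h : ¬ sub <+: cs.drop pos) :
    PySem.Chars.findFrom cs sub (pos : Int) = PySem.Chars.findFrom cs sub ((pos+1 : Nat) : Int) := by
  rw [PySem.Chars.findFrom_natCast cs sub pos (by omega),
      PySem.Chars.findFrom_natCast cs sub (pos+1) (by omega)]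
  have hdrop : cs.drop pos = cs[pos] :: cs.drop (pos+1) := List.drop_eq_getElem_cons hpos
  rw [hdrop] at h ⊢
  rw [pv_find_cons _ _ _ h]
  by_cases h1 : PySem.Chars.find (cs.drop (pos+1)) sub = -1
  · simp [h1]
  · rw [if_neg h1]
    have := PySem.Chars.neg_one_le_find (cs.drop (pos+1)) sub
    rw [if_neg (by omega), if_neg h1]
    push_cast; ring

lemma pv_findFrom_ge (cs sub : List Char) (pos : Nat) (hpos : pos ≤ cs.length)
    (hne : PySem.Chars.findFrom cs sub (pos : Int) ≠ -1) :
    (pos : Int) ≤ PySem.Chars.findFrom cs sub (pos : Int) :=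
  (PySem.Chars.findFrom_natCast_spec cs sub pos hpos hne).1

lemma pv_findFrom_end (cs sub : List Char) (hsub : sub ≠ []) :
    PySem.Chars.findFrom cs sub (cs.length : Int) = -1 := by
  rw [PySem.Chars.findFrom_natCast_eq_neg_one_iff cs sub cs.length le_rfl]
  simp [List.infix_nil]; exact hsub

lemma pv_slice_cons (cs : List Char) (pos t : Nat) (hpt : pos < t) (hlen : pos < cs.length) :
    PySem.List.slice cs (some (pos : Int)) (some (t : Int)) =
      cs[pos] :: PySem.List.slice cs (some ((pos+1 : Nat) : Int)) (some (t : Int)) := by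
  rw [PySem.List.slice_natCast, PySem.List.slice_natCast]
  rw [List.drop_eq_getElem_cons hlen]
  have h : t - pos = (t - (pos+1)) + 1 := by omega
  rw [h, List.take_succ_cons]

lemma pv_slice_self (cs : List Char) (pos : Nat) :
    PySem.List.slice cs (some (pos : Int)) (some (pos : Int)) = [] := by
  rw [PySem.List.slice_natCast]; simp

lemma pvBLoop_congr (cs term q : List Char) :
    ∀ f pos (p1 p2 : List (List Char)), p1.flatten = p2.flatten →
    pvMapFlat (pvBLoop cs term q p1 pos f) = pvMapFlat (pvBLoop cs term q p2 pos f) := by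
  intro f
  induction f with
  | zero => intro pos p1 p2 h; rfl
  | succ f ih =>
    intro pos p1 p2 h
    simp only [pvBLoop]
    split
    · split
      · simp [pvMapFlat, h]
      · split
        · rfl
        · split
          · exact ih _ _ _ (by simp [h])
          · exact ih _ _ _ (by simp [h])
    · rfl

lemma pvBLoop_step (cs term q : List Char) (parts : List (List Char)) (pos : Nat) (g : Nat)
    (h : pos < cs.length) (ch : Char) (hch : cs[pos]? = some ch) (hbs : ch ≠ '\\')
    (htm : ¬ term <+: cs.drop pos) (htne : term ≠ []) :
    pvMapFlat (pvBLoop cs term q parts pos (g+1)) =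
      pvMapFlat (pvBLoop cs term q (parts ++ [[ch]]) (pos+1) (g+1)) := by
  have hchg : cs[pos] = ch := by
    have := List.getElem?_eq_getElem h
    rw [this] at hch; exact Option.some.inj hch
  have hdrop : cs.drop pos = ch :: cs.drop (pos+1) := by
    rw [List.drop_eq_getElem_cons h, hchg]
  have hbsp : ¬ ['\\'] <+: cs.drop pos := by
    rw [hdrop, List.cons_prefix_cons]
    rintro ⟨hc, -⟩; exact hbs hc.symm
  have hbshift : PySem.Chars.findFrom cs ['\\'] (pos:Int) = PySem.Chars.findFrom cs ['\\'] ((pos+1:Nat):Int) :=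
    pv_findFrom_succ cs _ pos h hbsp
  have htshift : PySem.Chars.findFrom cs term (pos:Int) = PySem.Chars.findFrom cs term ((pos+1:Nat):Int) :=
    pv_findFrom_succ cs _ pos h htm
  by_cases h1 : pos + 1 < cs.length
  · simp only [pvBLoop, if_pos h, if_pos h1]
    rw [hbshift, htshift]
    set bs' := PySem.Chars.findFrom cs ['\\'] ((pos+1:Nat):Int) with hbs'
    set tq' := PySem.Chars.findFrom cs term ((pos+1:Nat):Int) with htq'
    by_cases hC : tq' ≠ -1 ∧ (bs' = -1 ∨ tq' ≤ bs')
    · rw [if_pos hC, if_pos hC]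
      have htgt : (pos:Int) < tq' := by
        rcases pv_findFrom_gt_of_not_prefix cs term pos (by omega) htm with hm | hgt
        · rw [htshift] at hm; exact absurd hm hC.1
        · rwa [htshift] at hgt
      have ht0 : (0:Int) ≤ tq' := by omega
      have htnat : tq' = ((tq'.toNat : Nat) : Int) := (Int.toNat_of_nonneg ht0).symm
      have hsl : PySem.List.slice cs (some (pos:Int)) (some tq') =
          ch :: PySem.List.slice cs (some ((pos+1:Nat):Int)) (some tq') := by
        rw [htnat, ← hchg]
        exact pv_slice_cons cs pos tq'.toNat (by omega) h
      simp [pvMapFlat, hsl]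
    · rw [if_neg hC, if_neg hC]
      by_cases hB : bs' = -1
      · rw [if_pos hB, if_pos hB]
      · rw [if_neg hB, if_neg hB]
        have hbgt : (pos:Int) < bs' := by
          rcases pv_findFrom_gt_of_not_prefix cs ['\\'] pos (by omega) hbsp with hm | hgt
          · rw [hbshift] at hm; exact absurd hm hB
          · rwa [hbshift] at hgt
        have hb0 : (0:Int) ≤ bs' := by omega
        have hbnat : bs' = ((bs'.toNat : Nat) : Int) := (Int.toNat_of_nonneg hb0).symm
        have hsl : PySem.List.slice cs (some (pos:Int)) (some bs') =
            ch :: PySem.List.slice cs (some ((pos+1:Nat):Int)) (some bs') := by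
          rw [hbnat, ← hchg]
          exact pv_slice_cons cs pos bs'.toNat (by omega) h
        split
        · exact pvBLoop_congr cs term q g _ _ _ (by simp [hsl])
        · exact pvBLoop_congr cs term q g _ _ _ (by simp [hsl])
  · have hlen : pos + 1 = cs.length := by omega
    have htA : PySem.Chars.findFrom cs term ((pos+1:Nat):Int) = -1 := by
      rw [show ((pos+1:Nat):Int) = (cs.length:Int) by exact_mod_cast congrArg Nat.cast hlen]
      exact pv_findFrom_end cs term htne
    have hbA : PySem.Chars.findFrom cs ['\\'] ((pos+1:Nat):Int) = -1 := by
      rw [show ((pos+1:Nat):Int) = (cs.length:Int) by exact_mod_cast congrArg Nat.cast hlen]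
      exact pv_findFrom_end cs _ (by simp)
    simp only [pvBLoop, if_pos h, if_neg h1]
    rw [hbshift, htshift, htA, hbA]
    simp [pvMapFlat]

lemma pvBLoop_term_hit (cs term q : List Char) (parts : List (List Char)) (pos g : Nat)
    (hlt : pos < cs.length) (hTM : term <+: cs.drop pos) :
    pvBLoop cs term q parts pos (g+1) = some (parts ++ [[]], (pos : Int) + (term.length : Int)) := by
  have htq : PySem.Chars.findFrom cs term (pos : Int) = (pos : Int) :=
    pv_findFrom_eq_of_prefix cs term pos (by omega) hTM
  have hcond : PySem.Chars.findFrom cs term (pos : Int) ≠ -1 ∧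
      (PySem.Chars.findFrom cs ['\\'] (pos : Int) = -1 ∨
        PySem.Chars.findFrom cs term (pos : Int) ≤ PySem.Chars.findFrom cs ['\\'] (pos : Int)) := by
    constructor
    · rw [htq]; omega
    · by_cases hb : PySem.Chars.findFrom cs ['\\'] (pos : Int) = -1
      · exact Or.inl hb
      · exact Or.inr (by rw [htq]; exact pv_findFrom_ge cs _ pos (by omega) hb)
  simp only [pvBLoop, if_pos hlt]
  rw [if_pos hcond, htq, pv_slice_self]

lemma pvBLoop_backslash (cs term q : List Char) (parts : List (List Char)) (pos g : Nat)
    (hlt : pos < cs.length) (hch : cs[pos]? = some '\\') (hTM : ¬ term <+: cs.drop pos) :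
    pvBLoop cs term q parts pos (g+1) =
      if pos + 1 < cs.length then
        (match cs[pos+1]? with
        | some nx =>
          (match pvEscapeChar? nx q with
          | some rep => pvBLoop cs term q (parts ++ [[]] ++ [rep]) (pos+2) g
          | none => pvBLoop cs term q (parts ++ [[]] ++ [['\\']]) (pos+1) g)
        | none => pvBLoop cs term q (parts ++ [[]] ++ [['\\']]) (pos+1) g)
      else pvBLoop cs term q (parts ++ [[]] ++ [['\\']]) (pos+1) g := by
  have hchg : cs[pos] = '\\' := by
    have := List.getElem?_eq_getElem hlt
    rw [this] at hch; exact Option.some.inj hch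
  have hdrop : cs.drop pos = '\\' :: cs.drop (pos+1) := by
    rw [List.drop_eq_getElem_cons hlt, hchg]
  have hbsp : ['\\'] <+: cs.drop pos := by rw [hdrop]; simp
  have hbsq : PySem.Chars.findFrom cs ['\\'] (pos : Int) = (pos : Int) :=
    pv_findFrom_eq_of_prefix cs _ pos (by omega) hbsp
  have hcond : ¬ (PySem.Chars.findFrom cs term (pos : Int) ≠ -1 ∧
      (PySem.Chars.findFrom cs ['\\'] (pos : Int) = -1 ∨
        PySem.Chars.findFrom cs term (pos : Int) ≤ PySem.Chars.findFrom cs ['\\'] (pos : Int))) := by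
    rintro ⟨hne, hd⟩
    rcases pv_findFrom_gt_of_not_prefix cs term pos (by omega) hTM with hm | hgt
    · exact hne hm
    · rcases hd with hb | hle
      · rw [hb] at hbsq; omega
      · rw [hbsq] at hle; omega
  have hbne : ¬ PySem.Chars.findFrom cs ['\\'] (pos : Int) = -1 := by rw [hbsq]; omega
  simp only [pvBLoop, if_pos hlt]
  rw [if_neg hcond, if_neg hbne, hbsq, pv_slice_self]
  simp only [Int.toNat_natCast]
  by_cases hc : pos + 1 < cs.length
  · rw [if_pos hc, if_pos hc]
    cases cs[pos+1]? with
    | none => rfl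
    | some nx => rfl
  · rw [if_neg hc, if_neg hc]

lemma pv_loop_eq (cs q : List Char) (qc : Char) (hq : q = [qc]) (triple : Bool)
    (term : List Char) (hterm : term = if triple then q ++ q ++ q else q) :
    ∀ fA : Nat, ∀ pos : Nat, ∀ resA resB : List (List Char), ∀ fB : Nat,
    resA.flatten = resB.flatten →
    cs.length - pos < fA → cs.length - pos < fB →
    pvMapFlat (pvALoop cs q triple resA (pos : Int) fA) = pvMapFlat (pvBLoop cs term q resB pos fB) := by
  intro fA
  induction fA with
  | zero => intro pos resA resB fB h hfa hfb; omega
  | succ f ih =>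
    intro pos resA resB fB hflat hfa hfb
    obtain ⟨g, rfl⟩ : ∃ g, fB = g + 1 := ⟨fB - 1, by omega⟩
    by_cases hlt : pos < cs.length
    case neg =>
      have hlt' : ¬ ((pos : Int) < (cs.length : Int)) := by exact_mod_cast hlt
      simp only [pvALoop, pvBLoop, if_neg hlt', if_neg hlt]
    case pos =>
      have hltI : ((pos : Int) < (cs.length : Int)) := by exact_mod_cast hlt
      have hget : PySem.List.pyGet? cs (pos : Int) = some cs[pos] := by
        rw [PySem.List.pyGet?_natCast]; exact List.getElem?_eq_getElem hlt
      have hch : cs[pos]? = some cs[pos] := List.getElem?_eq_getElem hlt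
      have hdrop : cs.drop pos = cs[pos] :: cs.drop (pos+1) := List.drop_eq_getElem_cons hlt
      have hc1 : ((pos : Int) + 1) = (((pos+1 : Nat)) : Int) := by push_cast; ring
      have hc2 : ((pos : Int) + 2) = (((pos+2 : Nat)) : Int) := by push_cast; ring
      have hc3 : ((pos : Int) + 3) = (((pos+3 : Nat)) : Int) := by push_cast; ring
      have htne : term ≠ [] := by subst hterm; subst hq; cases triple <;> simp
      by_cases hTM : term <+: cs.drop pos
      · -- terminator at pos: both return
        rw [pvBLoop_term_hit cs term q resB pos g hlt hTM]
        cases triple with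
        | true =>
          rw [if_pos rfl] at hterm
          have hlen3' : term.length = 3 := by rw [hterm, hq]; rfl
          have htest : PySem.List.slice cs (some (pos : Int)) (some ((pos : Int)+3)) = q ++ q ++ q := by
            rw [hc3, PySem.List.slice_natCast]
            have h3 : pos + 3 - pos = 3 := by omega
            rw [h3, ← hlen3', ← hterm]
            exact ((List.prefix_iff_eq_take).mp hTM).symm
          simp only [pvALoop, if_pos hltI, hget, if_true, if_pos htest]
          have hlen3 : (term.length : Int) = 3 := by rw [hlen3']; rfl
          simp [pvMapFlat, hflat, hlen3]
        | false =>
          rw [if_neg (by simp)] at hterm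
          have htest : [cs[pos]] = q := by
            rw [hterm, hq] at hTM
            rw [hdrop] at hTM
            rcases (List.cons_prefix_cons.mp hTM) with ⟨he, -⟩
            rw [hq, he]
          simp only [pvALoop, if_pos hltI, hget, Bool.false_eq_true, if_false, if_pos htest]
          have hlen1 : (term.length : Int) = 1 := by rw [hterm, hq]; rfl
          simp [pvMapFlat, hflat, hlen1]
      · -- no terminator at pos
        have hAtest : triple = true →
            ¬ (PySem.List.slice cs (some (pos : Int)) (some ((pos : Int)+3)) = q ++ q ++ q) := by
          intro htr hsl
          apply hTM
          rw [hterm, htr, if_pos rfl]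
          rw [hc3, PySem.List.slice_natCast] at hsl
          have h3 : pos + 3 - pos = 3 := by omega
          rw [h3] at hsl
          rw [List.prefix_iff_eq_take]
          have hql : (q ++ q ++ q).length = 3 := by rw [hq]; rfl
          rw [hql, ← hsl]
        have hStest : triple = false → ¬ ([cs[pos]] = q) := by
          intro htr he
          apply hTM
          rw [hterm, htr, if_neg (by simp), hdrop, ← he]
          exact List.cons_prefix_cons.mpr ⟨rfl, List.nil_prefix⟩
        by_cases hbsc : cs[pos] = '\\'
        · -- backslash
          rw [pvBLoop_backslash cs term q resB pos g hlt (by rw [hch, hbsc]) hTM]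
          by_cases h2 : pos + 1 < cs.length
          · have h2I : ((pos : Int) + 1 < (cs.length : Int)) := by rw [hc1]; exact_mod_cast h2
            have hget2 : PySem.List.pyGet? cs ((pos : Int)+1) = some cs[pos+1] := by
              rw [hc1, PySem.List.pyGet?_natCast]; exact List.getElem?_eq_getElem h2
            have hch2 : cs[pos+1]? = some cs[pos+1] := List.getElem?_eq_getElem h2
            rw [if_pos h2]
            set nx := cs[pos+1] with hnx
            -- reduce A to the escape chain, then case on nx
            have hrec : ∀ resA' resB' : List (List Char), resA'.flatten = resB'.flatten →
                pvMapFlat (pvALoop cs q triple resA' ((pos : Int)+2) f) =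
                  pvMapFlat (pvBLoop cs term q resB' (pos+2) g) := by
              intro resA' resB' hf
              rw [hc2]; exact ih (pos+2) resA' resB' g hf (by omega) (by omega)
            have hrec1 : ∀ resA' resB' : List (List Char), resA'.flatten = resB'.flatten →
                pvMapFlat (pvALoop cs q triple resA' ((pos : Int)+1) f) =
                  pvMapFlat (pvBLoop cs term q resB' (pos+1) g) := by
              intro resA' resB' hf
              rw [hc1]; exact ih (pos+1) resA' resB' g hf (by omega) (by omega)
            cases triple with
            | true =>
              simp only [pvALoop, if_pos hltI, hget, if_true, if_neg (hAtest rfl),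
                if_pos (show _ ∧ _ from ⟨hbsc, h2I⟩), hget2, hch2]
              by_cases hn : nx = 'n'
              · simp only [pvEscapeChar?, if_pos hn]
                exact hrec _ _ (by simp [hflat])
              · by_cases ht : nx = 't'
                · simp only [pvEscapeChar?, if_neg hn, if_pos ht]
                  exact hrec _ _ (by simp [hflat])
                · by_cases hr : nx = 'r'
                  · simp only [pvEscapeChar?, if_neg hn, if_neg ht, if_pos hr]
                    exact hrec _ _ (by simp [hflat])
                  · by_cases hqq : [nx] = q
                    · simp only [pvEscapeChar?, if_neg hn, if_neg ht, if_neg hr,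
                        if_pos (Or.inl hqq), if_pos hqq]
                      refine hrec _ _ ?_
                      have : q = [nx] := hqq.symm
                      simp [hflat, this]
                    · by_cases hbb : nx = '\\'
                      · simp only [pvEscapeChar?, if_neg hn, if_neg ht, if_neg hr, if_neg hqq,
                          if_pos hbb, if_pos (Or.inr hbb)]
                        refine hrec _ _ ?_
                        simp [hflat, hbb]
                      · have hesc : pvEscapeChar? nx q = none := by
                          simp only [pvEscapeChar?, if_neg hn, if_neg ht, if_neg hr]
                          rw [if_neg (by tauto)]
                        simp only [hesc, if_neg hn, if_neg ht, if_neg hr, if_neg hqq, if_neg hbb]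
                        refine hrec1 _ _ ?_
                        simp [hflat, hbsc]
            | false =>
              simp only [pvALoop, if_pos hltI, hget, Bool.false_eq_true, if_false,
                if_neg (hStest rfl), if_pos (show _ ∧ _ from ⟨hbsc, h2I⟩), hget2, hch2]
              by_cases hn : nx = 'n'
              · simp only [pvEscapeChar?, if_pos hn]
                exact hrec _ _ (by simp [hflat])
              · by_cases ht : nx = 't'
                · simp only [pvEscapeChar?, if_neg hn, if_pos ht]
                  exact hrec _ _ (by simp [hflat])
                · by_cases hr : nx = 'r'
                  · simp only [pvEscapeChar?, if_neg hn, if_neg ht, if_pos hr]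
                    exact hrec _ _ (by simp [hflat])
                  · by_cases hqq : [nx] = q
                    · simp only [pvEscapeChar?, if_neg hn, if_neg ht, if_neg hr,
                        if_pos (Or.inl hqq), if_pos hqq]
                      refine hrec _ _ ?_
                      have : q = [nx] := hqq.symm
                      simp [hflat, this]
                    · by_cases hbb : nx = '\\'
                      · simp only [pvEscapeChar?, if_neg hn, if_neg ht, if_neg hr, if_neg hqq,
                          if_pos hbb, if_pos (Or.inr hbb)]
                        refine hrec _ _ ?_
                        simp [hflat, hbb]
                      · have hesc : pvEscapeChar? nx q = none := by
                          simp only [pvEscapeChar?, if_neg hn, if_neg ht, if_neg hr]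
                          rw [if_neg (by tauto)]
                        simp only [hesc, if_neg hn, if_neg ht, if_neg hr, if_neg hqq, if_neg hbb]
                        refine hrec1 _ _ ?_
                        simp [hflat, hbsc]
          · -- trailing backslash, no room
            have h2I : ¬ ((pos : Int) + 1 < (cs.length : Int)) := by
              rw [hc1]; exact_mod_cast h2
            rw [if_neg h2]
            have hAr : pvMapFlat (pvALoop cs q triple (resA ++ [[cs[pos]]]) ((pos : Int)+1) f) =
                pvMapFlat (pvBLoop cs term q (resB ++ [[]] ++ [['\\']]) (pos+1) g) := by
              rw [hc1]; exact ih (pos+1) _ _ g (by simp [hflat, hbsc]) (by omega) (by omega)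
            cases triple with
            | true =>
              simp only [pvALoop, if_pos hltI, hget, if_true, if_neg (hAtest rfl),
                if_neg (show ¬(cs[pos] = '\\' ∧ (pos:Int)+1 < (cs.length:Int)) from fun hx => h2I hx.2)]
              exact hAr
            | false =>
              simp only [pvALoop, if_pos hltI, hget, Bool.false_eq_true, if_false,
                if_neg (hStest rfl), if_neg (show ¬(cs[pos] = '\\' ∧ (pos:Int)+1 < (cs.length:Int)) from fun hx => h2I hx.2)]
              exact hAr
        · -- ordinary character
          rw [pvBLoop_step cs term q resB pos g hlt cs[pos] hch hbsc hTM htne]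
          have hBr : pvMapFlat (pvALoop cs q triple (resA ++ [[cs[pos]]]) ((pos : Int)+1) f) =
              pvMapFlat (pvBLoop cs term q (resB ++ [[cs[pos]]]) (pos+1) (g+1)) := by
            rw [hc1]; exact ih (pos+1) _ _ (g+1) (by simp [hflat]) (by omega) (by omega)
          cases triple with
          | true =>
            simp only [pvALoop, if_pos hltI, hget, if_true, if_neg (hAtest rfl),
              if_neg (show ¬(cs[pos] = '\\' ∧ (pos:Int)+1 < (cs.length:Int)) from fun hx => hbsc hx.1)]
            exact hBr
          | false =>
            simp only [pvALoop, if_pos hltI, hget, Bool.false_eq_true, if_false,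
              if_neg (hStest rfl), if_neg (show ¬(cs[pos] = '\\' ∧ (pos:Int)+1 < (cs.length:Int)) from fun hx => hbsc hx.1)]
            exact hBr

lemma pv_pyGet?_isSome (cs : List Char) (i : Int) (h1 : -(cs.length : Int) ≤ i)
    (h2 : i < (cs.length : Int)) : ∃ c, PySem.List.pyGet? cs i = some c := by
  by_cases h0 : 0 ≤ i
  · refine ⟨cs[i.toNat]'(by omega), ?_⟩
    simp only [PySem.List.pyGet?, PySem.List.pyIdx?, if_pos h0, if_pos h2]
    exact List.getElem?_eq_getElem (by omega)
  · have hk : cs.length - (-i).toNat < cs.length := by omega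
    refine ⟨cs[cs.length - (-i).toNat]'hk, ?_⟩
    simp only [PySem.List.pyGet?, PySem.List.pyIdx?, if_neg h0, if_pos h1]
    exact List.getElem?_eq_getElem hk

lemma pv_outer (cs q : List Char) (c : Char) (hq : q = [c]) (s : Nat)
    (T1 T2 : Bool) (hTT : T1 = T2) :
    (match pvALoop cs q T1 [] (if T1 = true then (s:Int) + 3 else (s:Int) + 1) (2 * cs.length + 3) with
     | some (res, e) => ((some (String.ofList res.flatten) : Option String), e)
     | none => ((none : Option String), (s:Int))) =
    (match pvBLoop cs (if T2 = true then q ++ q ++ q else q) q [] (if T2 = true then s + 3 else s + 1) (cs.length + 1) with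
     | some (res, e) => ((some (String.ofList res.flatten) : Option String), e)
     | none => ((none : Option String), (s:Int))) := by
  subst hTT
  have hml := pv_loop_eq cs q c hq T1 (if T1 = true then q ++ q ++ q else q) rfl
    (2 * cs.length + 3) (if T1 = true then s + 3 else s + 1) [] []
    (cs.length + 1) rfl (by split <;> omega) (by split <;> omega)
  have hposc : ((if T1 = true then s + 3 else s + 1 : Nat) : Int)
      = (if T1 = true then (s:Int) + 3 else (s:Int) + 1) := by
    cases T1 <;> simp
  rw [hposc] at hml
  cases hA : pvALoop cs q T1 [] (if T1 = true then (s:Int) + 3 else (s:Int) + 1) (2 * cs.length + 3) with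
  | none =>
    cases hB : pvBLoop cs (if T1 = true then q ++ q ++ q else q) q [] (if T1 = true then s + 3 else s + 1) (cs.length + 1) with
    | none => rfl
    | some p => rw [hA, hB] at hml; simp [pvMapFlat] at hml
  | some p =>
    cases hB : pvBLoop cs (if T1 = true then q ++ q ++ q else q) q [] (if T1 = true then s + 3 else s + 1) (cs.length + 1) with
    | none => rw [hA, hB] at hml; simp [pvMapFlat] at hml
    | some p2 =>
      rw [hA, hB] at hml
      simp only [pvMapFlat, Option.map_some] at hml
      obtain ⟨h1, h2⟩ := Prod.ext_iff.mp (Option.some.inj hml)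
      simp only at h1 h2
      simp [h1, h2]

-- ===== VERDICT (by name: the statement is the Claim_ definition above) =====
theorem parse_python_string_py_spec : Claim_equal_parse_python_string_py := by
  intro text start quote_char hdom hpre
  unfold Pre_parse_python_string_py at hpre
  unfold Spec_parse_python_string_py
  unfold parse_python_string_py parse_python_string_py_alt
  set cs := text.toList with hcs
  set q := quote_char.toList with hqdef
  by_cases hge : start ≥ (cs.length : Int)
  · rw [if_pos hge, if_pos (Or.inr hge)]
  · have hltI : start < (cs.length : Int) := by omega
    rw [if_neg hge]
    obtain ⟨c, hc⟩ := pv_pyGet?_isSome cs start (by omega) hltI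
    by_cases hcq : [c] = q
    · -- opening quote matches
      obtain ⟨s, rfl⟩ : ∃ s : Nat, start = (s : Int) := ⟨start.toNat, (Int.toNat_of_nonneg hpre).symm⟩
      have hslt : s < cs.length := by exact_mod_cast hltI
      have hcg : cs[((s:Int)).toNat]? = some c := by
        rw [Int.toNat_natCast, ← PySem.List.pyGet?_natCast]; exact hc
      rw [if_neg (show ¬((s:Int) < 0 ∨ (s:Int) ≥ (cs.length:Int)) by push_neg; exact ⟨by omega, hltI⟩)]
      simp only [hc, hcg, if_neg (not_not_intro hcq)]
      refine pv_outer cs q c hcq.symm s _ _ ?_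
      rw [decide_eq_decide]
      have hc3 : ((s:Int) + 3) = (((s+3 : Nat)) : Int) := by push_cast; ring
      rw [hc3, PySem.List.slice_natCast, Int.toNat_natCast]
      have h3 : s + 3 - s = 3 := by omega
      rw [h3]
    · -- opening quote does not match: both return (none, start)
      rw [if_neg (show ¬(start < 0 ∨ start ≥ (cs.length:Int)) by push_neg; exact ⟨by omega, hltI⟩)]
      obtain ⟨s, rfl⟩ : ∃ s : Nat, start = (s : Int) := ⟨start.toNat, by omega⟩
      have hcg : cs[((s:Int)).toNat]? = some c := by
        rw [Int.toNat_natCast, ← PySem.List.pyGet?_natCast]; exact hc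
      simp only [hc, hcg, if_pos (show [c] ≠ q from hcq)]
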